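-- pv_equiv track=rewrite | github.com/whri-phenogenomics/PhenoDigm2 | pd2/loaddiseases.py | checkDiseaseIndex
-- ===== SOURCE A (Python) =====
-- def checkDiseaseIndex(did):
--     """Check that a disease_id, e.g. OMIM:1234 is well formed."""
--
--     # disease ids cannot be empty or with spaces
--     if did == "" or (' ' in did):
--         return False
--
--     # don't want commas
--     if ',' in did:
--         return False
--
--     # ids must start with a prefix and have meaningful
--     okprefix = ["OMIM:", "DECIPHER:", "ORPHA:"]
--     for p in okprefix:
--         if did.startswith(p) and len(did) > len(p):
--             return True
--     return False
-- ===== SOURCE B (Python) =====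
-- def checkDiseaseIndex(did):
--     """Check that a disease_id, e.g. OMIM:1234 is well formed."""
--     parts = did.split(":", 1)
--     if len(parts) != 2:
--         return False
--     head, tail = parts
--     return (head in ("OMIM", "DECIPHER", "ORPHA") and tail != ""
--             and " " not in did and "," not in did)
-- ===== Notes on version B (the rewrite author's own statement) =====
-- stated objective: idiomatic
-- what changed: Replaces the guard chain plus prefix loop by a single split on the first colon: the head must equal one of the three bare prefix names and the remainder must be non-empty, with the space and comma checks folded into one boolean expression.
import Mathlib
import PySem

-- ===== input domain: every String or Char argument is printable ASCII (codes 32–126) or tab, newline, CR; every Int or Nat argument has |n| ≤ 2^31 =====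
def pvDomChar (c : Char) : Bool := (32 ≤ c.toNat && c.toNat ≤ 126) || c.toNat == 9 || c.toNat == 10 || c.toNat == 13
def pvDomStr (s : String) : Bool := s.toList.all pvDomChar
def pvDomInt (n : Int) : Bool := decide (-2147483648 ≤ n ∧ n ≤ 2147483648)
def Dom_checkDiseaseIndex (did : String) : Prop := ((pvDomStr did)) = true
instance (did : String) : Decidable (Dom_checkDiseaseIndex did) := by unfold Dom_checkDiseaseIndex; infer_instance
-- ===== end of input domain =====

-- B replaces A's guard chain plus startswith-loop by a single split(':', 1) on the id; same results, more idiomatic.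

-- ===== PORT A =====
def checkDiseaseIndex (did : String) : Bool :=
  if did == "" || PySem.Str.isIn " " did then false
  else if PySem.Str.isIn "," did then false
  else
    -- the for-loop over okprefix with an early 'return True' is List.any over the same list
    ["OMIM:", "DECIPHER:", "ORPHA:"].any (fun p =>
      PySem.Str.startswith did p && decide (PySem.Str.len did > PySem.Str.len p))

-- ===== PORT B =====
def checkDiseaseIndex_alt (did : String) : Bool :=
  match PySem.Str.splitMax? did ":" 1 with
  | some [head, tail] =>
      (head == "OMIM" || head == "DECIPHER" || head == "ORPHA") && tail != "" &&
      !(PySem.Str.isIn " " did) && !(PySem.Str.isIn "," did)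
  | _ => false

-- ===== PRECONDITION & SPEC =====
def Spec_checkDiseaseIndex (did : String) (out : Bool) : Prop := out = checkDiseaseIndex_alt did
instance (did : String) (out : Bool) : Decidable (Spec_checkDiseaseIndex did out) := by unfold Spec_checkDiseaseIndex; infer_instance

-- ===== CLAIM (what is proved, stated in full; the proofs are below) =====
def Claim_equal_checkDiseaseIndex : Prop := ∀ (did : String), Dom_checkDiseaseIndex did → Spec_checkDiseaseIndex did (checkDiseaseIndex did)

-- ===== LEMMAS AND PROOFS =====

theorem go0 (fuel : Nat) (l : List Char) (acc : List (List Char)) :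
    PySem.Chars.splitOnMax.go [':'] fuel 0 l [] acc = (l :: acc).reverse := by
  cases fuel with
  | zero => simp [PySem.Chars.splitOnMax.go]
  | succ f => cases l <;> simp [PySem.Chars.splitOnMax.go]

theorem go1 (l : List Char) : ∀ (cur : List Char) (acc : List (List Char)) (fuel : Nat),
    l.length ≤ fuel →
    PySem.Chars.splitOnMax.go [':'] fuel 1 l cur acc =
      if ':' ∈ l then
        ((l.dropWhile (· ≠ ':')).tail :: (cur.reverse ++ l.takeWhile (· ≠ ':')) :: acc).reverse
      else ((cur.reverse ++ l) :: acc).reverse := by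
  induction l with
  | nil => intro cur acc fuel _; cases fuel <;> simp [PySem.Chars.splitOnMax.go]
  | cons c rest ih =>
    intro cur acc fuel hf
    cases fuel with
    | zero => simp at hf
    | succ f =>
      by_cases hc : c = ':'
      · subst hc
        simp [PySem.Chars.splitOnMax.go, go0, List.takeWhile, List.dropWhile]
      · have : [':'].isPrefixOf (c :: rest) = false := by
          simp [List.isPrefixOf]; exact fun h => (hc h.symm).elim
        simp only [PySem.Chars.splitOnMax.go, this]
        rw [ih (c :: cur) acc f (by simpa using hf)]
        simp [List.takeWhile, List.dropWhile, hc]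
        by_cases hm : ':' ∈ rest <;> simp [hm, Ne.symm hc]

theorem split_char (l : List Char) :
    PySem.Chars.splitOnMax l [':'] 1 =
      if ':' ∈ l then [l.takeWhile (· ≠ ':'), (l.dropWhile (· ≠ ':')).tail] else [l] := by
  unfold PySem.Chars.splitOnMax
  rw [if_neg (by norm_num)]
  rw [show Int.toNat 1 = 1 from rfl, go1 l [] [] (l.length + 1) (by omega)]
  by_cases hm : ':' ∈ l <;> simp [hm]

theorem tw_dw (p t : List Char) (hp : ':' ∉ p) :
    (p ++ ':' :: t).takeWhile (· ≠ ':') = p ∧ (p ++ ':' :: t).dropWhile (· ≠ ':') = ':' :: t := by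
  induction p with
  | nil => simp
  | cons c cs ih =>
    have hc : c ≠ ':' := fun h => hp (h ▸ List.mem_cons_self ..)
    have h2 := ih (fun h => hp (List.mem_cons_of_mem _ h))
    simp only [ne_eq, decide_not] at h2 ⊢
    simp [hc, h2.1, h2.2]

theorem startswith_len_iff (p l : List Char) (hp : ':' ∉ p) :
    ((p ++ [':']).isPrefixOf l = true ∧ p.length + 1 < l.length) ↔
      (':' ∈ l ∧ l.takeWhile (· ≠ ':') = p ∧ (l.dropWhile (· ≠ ':')).tail ≠ []) := by
  have e : ∀ t : List Char, p ++ [':'] ++ t = p ++ ':' :: t := by intro t; simp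
  constructor
  · rintro ⟨hpre, hlen⟩
    obtain ⟨t, rfl⟩ := List.isPrefixOf_iff_prefix.mp hpre
    have ht : t ≠ [] := by intro h; subst h; simp at hlen
    have h2 := tw_dw p t hp
    rw [e t]
    refine ⟨by simp, h2.1, ?_⟩
    rw [h2.2]; simpa using ht
  · rintro ⟨hm, htk, htl⟩
    cases hdw : l.dropWhile (· ≠ ':') with
    | nil =>
      exfalso
      have hta : l.takeWhile (fun x => decide (x ≠ ':')) = l := by
        have h := List.takeWhile_append_dropWhile (p := fun x => decide (x ≠ ':')) (l := l)
        rw [hdw, List.append_nil] at h; exact h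
      rw [← hta] at hm
      have := List.mem_takeWhile_imp hm
      simp at this
    | cons d ds =>
      have hne : l.dropWhile (fun x => decide (x ≠ ':')) ≠ [] := by rw [hdw]; simp
      have hd := List.head_dropWhile_not (p := fun x => decide (x ≠ ':')) (l := l) hne
      have hd' : d = ':' := by
        have hh : (l.dropWhile (fun x => decide (x ≠ ':'))).head hne = d := by
          have h1 : (l.dropWhile (fun x => decide (x ≠ ':'))).head? = some d := by rw [hdw]; rfl
          rw [List.head?_eq_some_head hne] at h1
          exact Option.some.inj h1
        rw [hh] at hd; simpa using hd
      have hds : ds ≠ [] := by rw [hdw] at htl; simpa using htl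
      have hl : l = p ++ ':' :: ds := by
        conv_lhs => rw [← List.takeWhile_append_dropWhile (p := fun x => decide (x ≠ ':')) (l := l)]
        rw [htk, hdw, hd']
      subst hl
      refine ⟨List.isPrefixOf_iff_prefix.mpr ⟨ds, by simp [e]⟩, ?_⟩
      have : 0 < ds.length := List.length_pos_iff.mpr hds
      simp [List.length_append]; omega

theorem ofList_beq (xs : List Char) (t : String) :
    (String.ofList xs == t) = decide (xs = t.toList) := by
  apply Bool.eq_iff_iff.mpr
  simp only [beq_iff_eq, decide_eq_true_eq]
  constructor
  · intro h; rw [← h, String.toList_ofList]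
  · intro h; rw [← String.toList_inj, String.toList_ofList, h]

theorem chars_equiv (l : List Char) (hm : ':' ∈ l) :
    (("OMIM:".toList.isPrefixOf l && decide ((l.length : Int) > ("OMIM:".toList.length : Int))) ||
     (("DECIPHER:".toList.isPrefixOf l && decide ((l.length : Int) > ("DECIPHER:".toList.length : Int))) ||
      ("ORPHA:".toList.isPrefixOf l && decide ((l.length : Int) > ("ORPHA:".toList.length : Int))))) =
    (((decide (l.takeWhile (· ≠ ':') = "OMIM".toList) ||
       decide (l.takeWhile (· ≠ ':') = "DECIPHER".toList)) ||
      decide (l.takeWhile (· ≠ ':') = "ORPHA".toList)) &&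
     !decide ((l.dropWhile (· ≠ ':')).tail = [])) := by
  have h1 := startswith_len_iff "OMIM".toList l (by decide)
  have h2 := startswith_len_iff "DECIPHER".toList l (by decide)
  have h3 := startswith_len_iff "ORPHA".toList l (by decide)
  have e1 : "OMIM:".toList = "OMIM".toList ++ [':'] := rfl
  have e2 : "DECIPHER:".toList = "DECIPHER".toList ++ [':'] := rfl
  have e3 : "ORPHA:".toList = "ORPHA".toList ++ [':'] := rfl
  rw [Bool.eq_iff_iff]
  simp only [e1, e2, e3, Bool.or_eq_true, Bool.and_eq_true, decide_eq_true_eq,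
    Bool.not_eq_true', decide_eq_false_iff_not, gt_iff_lt, Nat.cast_lt, List.length_append,
    List.length_cons, List.length_nil]
  constructor
  · rintro (⟨hpre, hlen⟩ | ⟨hpre, hlen⟩ | ⟨hpre, hlen⟩)
    · have := h1.mp ⟨hpre, by simpa using hlen⟩
      exact ⟨Or.inl (Or.inl this.2.1), this.2.2⟩
    · have := h2.mp ⟨hpre, by simpa using hlen⟩
      exact ⟨Or.inl (Or.inr this.2.1), this.2.2⟩
    · have := h3.mp ⟨hpre, by simpa using hlen⟩
      exact ⟨Or.inr this.2.1, this.2.2⟩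
  · rintro ⟨((ht | ht) | ht), hta⟩
    · have := h1.mpr ⟨hm, ht, hta⟩
      exact Or.inl ⟨this.1, by have := this.2; simpa using this⟩
    · have := h2.mpr ⟨hm, ht, hta⟩
      exact Or.inr (Or.inl ⟨this.1, by have := this.2; simpa using this⟩)
    · have := h3.mpr ⟨hm, ht, hta⟩
      exact Or.inr (Or.inr ⟨this.1, by have := this.2; simpa using this⟩)

theorem main_eq (did : String) : checkDiseaseIndex did = checkDiseaseIndex_alt did := by
  have hsplit : PySem.Str.splitMax? did ":" 1 =
      some ((PySem.Chars.splitOnMax did.toList [':'] 1).map String.ofList) := by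
    simp [PySem.Str.splitMax?, PySem.Chars.splitMax?]
  rw [split_char] at hsplit
  by_cases hsp : PySem.Str.isIn " " did = true
  · unfold checkDiseaseIndex checkDiseaseIndex_alt
    rw [hsplit, hsp]
    by_cases hm : ':' ∈ did.toList <;> simp [hm]
  · have hspB : PySem.Str.isIn " " did = false := by simpa using hsp
    by_cases hcm : PySem.Str.isIn "," did = true
    · unfold checkDiseaseIndex checkDiseaseIndex_alt
      rw [hsplit, hspB, hcm]
      by_cases hm : ':' ∈ did.toList <;> simp [hm]
    · have hcmB : PySem.Str.isIn "," did = false := by simpa using hcm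
      by_cases hm : ':' ∈ did.toList
      · rw [if_pos hm] at hsplit
        have hne : did ≠ "" := fun h => by rw [h] at hm; simp at hm
        have hb : (did == "") = false := beq_eq_false_iff_ne.mpr hne
        unfold checkDiseaseIndex checkDiseaseIndex_alt
        rw [hsplit, hspB, hcmB, hb]
        simp only [List.map_cons, List.map_nil, Bool.not_false, Bool.and_true,
          if_false, List.any_cons, List.any_nil, Bool.or_false, ofList_beq, bne,
          PySem.Str.startswith, PySem.Chars.startswith, PySem.Str.len,
          Bool.false_eq_true, show ("" : String).toList = [] from rfl]
        rw [← chars_equiv did.toList hm]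
        rfl
      · rw [if_neg hm] at hsplit
        have hq1 : ¬ ((['O','M','I','M',':'] : List Char) <+: did.toList) :=
          fun hpre => hm (hpre.mem (by decide))
        have hq2 : ¬ ((['D','E','C','I','P','H','E','R',':'] : List Char) <+: did.toList) :=
          fun hpre => hm (hpre.mem (by decide))
        have hq3 : ¬ ((['O','R','P','H','A',':'] : List Char) <+: did.toList) :=
          fun hpre => hm (hpre.mem (by decide))
        unfold checkDiseaseIndex checkDiseaseIndex_alt
        rw [hsplit, hspB, hcmB]
        by_cases hone : did = "" <;>
          simp [hone, hq1, hq2, hq3, PySem.Str.startswith, PySem.Chars.startswith]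

-- ===== VERDICT (by name: the statement is the Claim_ definition above) =====
theorem checkDiseaseIndex_spec : Claim_equal_checkDiseaseIndex := by
  intro did _
  unfold Spec_checkDiseaseIndex
  exact main_eq did
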